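-- pv_equiv track=rewrite | github.com/daideguchi/youtube_production2 | packages/audio_tts/tts/arbiter.py | _jp_number_kana
-- ===== SOURCE A (Python) =====
-- from typing import List, Dict, Optional, Any
--
-- def _jp_number_kana_under_10000(n: int) -> str:
--     digits = ["ゼロ", "イチ", "ニ", "サン", "ヨン", "ゴ", "ロク", "ナナ", "ハチ", "キュウ"]
--     if n <= 0:
--         return ""
--     parts: List[str] = []
--     thousands = (n // 1000) % 10
--     hundreds = (n // 100) % 10
--     tens = (n // 10) % 10
--     ones = n % 10
--
--     if thousands:
--         if thousands == 1:
--             parts.append("セン")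
--         elif thousands == 3:
--             parts.append("サンゼン")
--         elif thousands == 8:
--             parts.append("ハッセン")
--         else:
--             parts.append(digits[thousands] + "セン")
--     if hundreds:
--         if hundreds == 1:
--             parts.append("ヒャク")
--         elif hundreds == 3:
--             parts.append("サンビャク")
--         elif hundreds == 6:
--             parts.append("ロッピャク")
--         elif hundreds == 8:
--             parts.append("ハッピャク")
--         else:
--             parts.append(digits[hundreds] + "ヒャク")
--     if tens:
--         if tens == 1:
--             parts.append("ジュウ")
--         else:
--             parts.append(digits[tens] + "ジュウ")
--     if ones:
--         parts.append(digits[ones])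
--     return "".join(parts)
--
-- def _jp_number_kana(n: int) -> str:
--     """Arabic integer -> Katakana reading (no counters)."""
--     if n == 0:
--         return "ゼロ"
--     if n < 0:
--         return "マイナス" + _jp_number_kana(-n)
--
--     units = [
--         (10**12, "チョウ"),
--         (10**8, "オク"),
--         (10**4, "マン"),
--         (1, ""),
--     ]
--     parts: List[str] = []
--     remaining = n
--     for base, unit in units:
--         chunk = remaining // base
--         remaining = remaining % base
--         if chunk <= 0:
--             continue
--         chunk_read = _jp_number_kana_under_10000(int(chunk))
--         if not chunk_read:
--             continue
--         parts.append(chunk_read + unit)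
--     return "".join(parts) or "ゼロ"
-- ===== SOURCE B (Python) =====
-- def _jp_number_kana(n: int) -> str:
--     """Arabic integer -> Katakana reading (no counters)."""
--     if n == 0:
--         return "ゼロ"
--     if n < 0:
--         return "マイナス" + _jp_number_kana(-n)
--     digits = ["ゼロ", "イチ", "ニ", "サン", "ヨン", "ゴ", "ロク", "ナナ", "ハチ", "キュウ"]
--     places = ["", "ジュウ", "ヒャク", "セン"]
--     group_units = ["", "マン", "オク", "チョウ"]
--     special = {
--         (3, 3): "サンゼン", (3, 8): "ハッセン",
--         (2, 3): "サンビャク", (2, 6): "ロッピャク", (2, 8): "ハッピャク",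
--     }
--     out = []
--     for pos in range(15, -1, -1):
--         group, place = divmod(pos, 4)
--         d = (n // 10 ** pos) % 10
--         if d:
--             if (place, d) in special:
--                 out.append(special[(place, d)])
--             elif place > 0 and d == 1:
--                 out.append(places[place])
--             elif place > 0:
--                 out.append(digits[d] + places[place])
--             else:
--                 out.append(digits[d])
--         if place == 0 and group > 0 and (n // 10 ** pos) % 10000 > 0:
--             out.append(group_units[group])
--     return "".join(out) or "ゼロ"
-- ===== Notes on version B (the rewrite author's own statement) =====
-- stated objective: alternative
-- what changed: Replaces A's chunk recursion (split into 4-digit chunks via repeated //, % and a separate under-10000 helper with per-place if-chains) by a single flat pass over digit positions 15..0 with a (place,digit)-keyed table for the euphonic specials and group units emitted inline.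
import Mathlib
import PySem

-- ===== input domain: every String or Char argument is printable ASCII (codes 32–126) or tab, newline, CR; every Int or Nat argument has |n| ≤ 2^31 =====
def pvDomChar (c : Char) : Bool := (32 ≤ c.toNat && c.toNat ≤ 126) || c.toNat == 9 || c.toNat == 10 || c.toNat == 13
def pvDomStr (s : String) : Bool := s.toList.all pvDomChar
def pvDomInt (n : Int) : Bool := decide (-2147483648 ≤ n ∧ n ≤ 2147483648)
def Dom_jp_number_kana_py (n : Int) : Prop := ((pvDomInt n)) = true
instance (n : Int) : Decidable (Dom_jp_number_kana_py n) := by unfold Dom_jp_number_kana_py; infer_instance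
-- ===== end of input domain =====

-- B replaces A's 4-digit-chunk recursion with one flat pass over digit positions 15..0
-- using a (place,digit) special-reading table; alternative decomposition, same cost.


-- ===== PORT A =====
def jpDigits : List String := ["ゼロ", "イチ", "ニ", "サン", "ヨン", "ゴ", "ロク", "ナナ", "ハチ", "キュウ"]

def jpUnder10000 (n : Int) : String :=
  if n ≤ 0 then ""
  else
    let thousands := PySem.Int.mod (PySem.Int.floordiv n 1000) 10
    let hundreds := PySem.Int.mod (PySem.Int.floordiv n 100) 10
    let tens := PySem.Int.mod (PySem.Int.floordiv n 10) 10
    let ones := PySem.Int.mod n 10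
    let parts : List String :=
      (if thousands ≠ 0 then
        [if thousands = 1 then "セン"
         else if thousands = 3 then "サンゼン"
         else if thousands = 8 then "ハッセン"
         else PySem.List.pyGetD jpDigits thousands "" ++ "セン"]
       else [])
      ++ (if hundreds ≠ 0 then
        [if hundreds = 1 then "ヒャク"
         else if hundreds = 3 then "サンビャク"
         else if hundreds = 6 then "ロッピャク"
         else if hundreds = 8 then "ハッピャク"
         else PySem.List.pyGetD jpDigits hundreds "" ++ "ヒャク"]
       else [])
      ++ (if tens ≠ 0 then
        [if tens = 1 then "ジュウ" else PySem.List.pyGetD jpDigits tens "" ++ "ジュウ"]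
       else [])
      ++ (if ones ≠ 0 then [PySem.List.pyGetD jpDigits ones ""] else [])
    String.join parts

def jpChunksLoop : List (Int × String) → Int → List String → List String
  | [], _, parts => parts
  | (base, unit) :: rest, remaining, parts =>
      let chunk := PySem.Int.floordiv remaining base
      let remaining' := PySem.Int.mod remaining base
      if chunk ≤ 0 then jpChunksLoop rest remaining' parts
      else
        let chunk_read := jpUnder10000 chunk
        if chunk_read = "" then jpChunksLoop rest remaining' parts
        else jpChunksLoop rest remaining' (parts ++ [chunk_read ++ unit])

def jp_number_kana_py (n : Int) : String :=
  if n = 0 then "ゼロ"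
  else if n < 0 then "マイナス" ++ jp_number_kana_py (-n)
  else
    let units : List (Int × String) := [(10 ^ 12, "チョウ"), (10 ^ 8, "オク"), (10 ^ 4, "マン"), (1, "")]
    let s := String.join (jpChunksLoop units n [])
    if s = "" then "ゼロ" else s
termination_by ((if n < 0 then 1 else 0) : Nat)
decreasing_by split_ifs <;> omega

-- ===== PORT B =====
def jpAltDigits : List String := ["ゼロ", "イチ", "ニ", "サン", "ヨン", "ゴ", "ロク", "ナナ", "ハチ", "キュウ"]
def jpAltPlaces : List String := ["", "ジュウ", "ヒャク", "セン"]
def jpAltUnits : List String := ["", "マン", "オク", "チョウ"]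
def jpAltSpecial : PySem.Dict (Int × Int) String :=
  PySem.Dict.ofList [((3, 3), "サンゼン"), ((3, 8), "ハッセン"),
                     ((2, 3), "サンビャク"), ((2, 6), "ロッピャク"), ((2, 8), "ハッピャク")]

def jpAltStep (n : Int) (out : List String) (pos : Int) : List String :=
  let group := PySem.Int.floordiv pos 4
  let place := PySem.Int.mod pos 4
  let d := PySem.Int.mod (PySem.Int.floordiv n ((10 : Int) ^ pos.toNat)) 10
  let out :=
    if d ≠ 0 then
      match PySem.Dict.get? jpAltSpecial (place, d) with
      | some s => out ++ [s]
      | none =>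
        if place > 0 ∧ d = 1 then out ++ [PySem.List.pyGetD jpAltPlaces place ""]
        else if place > 0 then
          out ++ [PySem.List.pyGetD jpAltDigits d "" ++ PySem.List.pyGetD jpAltPlaces place ""]
        else out ++ [PySem.List.pyGetD jpAltDigits d ""]
    else out
  if place = 0 ∧ group > 0 ∧ PySem.Int.mod (PySem.Int.floordiv n ((10 : Int) ^ pos.toNat)) 10000 > 0 then
    out ++ [PySem.List.pyGetD jpAltUnits group ""]
  else out

def jp_number_kana_py_alt (n : Int) : String :=
  if n = 0 then "ゼロ"
  else if n < 0 then "マイナス" ++ jp_number_kana_py_alt (-n)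
  else
    let s := String.join ((PySem.List.pyRange 15 (-1) (-1)).foldl (jpAltStep n) [])
    if s = "" then "ゼロ" else s
termination_by ((if n < 0 then 1 else 0) : Nat)
decreasing_by split_ifs <;> omega

-- ===== PRECONDITION & SPEC =====
def Spec_jp_number_kana_py (n : Int) (out : String) : Prop := out = jp_number_kana_py_alt n
instance (n : Int) (out : String) : Decidable (Spec_jp_number_kana_py n out) := by unfold Spec_jp_number_kana_py; infer_instance

-- ===== CLAIM (what is proved, stated in full; the proofs are below) =====
def Claim_equal_jp_number_kana_py : Prop := ∀ (n : Int), Dom_jp_number_kana_py n → Spec_jp_number_kana_py n (jp_number_kana_py n)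

-- ===== LEMMAS AND PROOFS =====

def segB (place d : Int) : String :=
  if d = 0 then "" else
  match PySem.Dict.get? jpAltSpecial (place, d) with
  | some s => s
  | none =>
    if place > 0 ∧ d = 1 then PySem.List.pyGetD jpAltPlaces place ""
    else if place > 0 then PySem.List.pyGetD jpAltDigits d "" ++ PySem.List.pyGetD jpAltPlaces place ""
    else PySem.List.pyGetD jpAltDigits d ""

def bEmit (n pos : Int) : List String :=
  (if PySem.Int.mod (PySem.Int.floordiv n ((10 : Int) ^ pos.toNat)) 10 = 0 then []
   else [segB (PySem.Int.mod pos 4) (PySem.Int.mod (PySem.Int.floordiv n ((10 : Int) ^ pos.toNat)) 10)])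
  ++ (if PySem.Int.mod pos 4 = 0 ∧ PySem.Int.floordiv pos 4 > 0 ∧
         PySem.Int.mod (PySem.Int.floordiv n ((10 : Int) ^ pos.toNat)) 10000 > 0 then
        [PySem.List.pyGetD jpAltUnits (PySem.Int.floordiv pos 4) ""]
      else [])

def Jchunk (c : Int) (u : String) : List String :=
  if c ≤ 0 then [] else if jpUnder10000 c = "" then [] else [jpUnder10000 c ++ u]

theorem altStep_emit (n out pos : _) : jpAltStep n out pos = out ++ bEmit n pos := by
  unfold jpAltStep bEmit
  cases h : PySem.Dict.get? jpAltSpecial (PySem.Int.mod pos 4,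
      PySem.Int.mod (PySem.Int.floordiv n ((10 : Int) ^ pos.toNat)) 10) <;>
    split_ifs <;> simp_all [segB] <;> split_ifs <;> simp_all <;> omega

theorem foldl_alt (n : Int) :
    List.foldl (jpAltStep n) [] (PySem.List.pyRange 15 (-1) (-1)) =
      bEmit n 15 ++ bEmit n 14 ++ bEmit n 13 ++ bEmit n 12 ++ bEmit n 11 ++ bEmit n 10 ++
      bEmit n 9 ++ bEmit n 8 ++ bEmit n 7 ++ bEmit n 6 ++ bEmit n 5 ++ bEmit n 4 ++
      bEmit n 3 ++ bEmit n 2 ++ bEmit n 1 ++ bEmit n 0 := by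
  have hr : PySem.List.pyRange 15 (-1) (-1) = [15,14,13,12,11,10,9,8,7,6,5,4,3,2,1,0] := by decide
  rw [hr]
  simp only [List.foldl, altStep_emit, List.nil_append, List.append_assoc]

theorem jpChunksLoop_acc (l : List (Int × String)) :
    ∀ r parts, jpChunksLoop l r parts = parts ++ jpChunksLoop l r [] := by
  induction l with
  | nil => intro r parts; simp [jpChunksLoop]
  | cons hd tl ih =>
    intro r parts
    obtain ⟨base, unit⟩ := hd
    simp only [jpChunksLoop]
    split_ifs
    · exact ih _ _
    · exact ih _ _
    · rw [ih _ (parts ++ [jpUnder10000 (PySem.Int.floordiv r base) ++ unit]),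
          ih _ ([] ++ [jpUnder10000 (PySem.Int.floordiv r base) ++ unit])]
      simp

theorem chunksA_step (b : Int) (u : String) (rest : List (Int × String)) (r : Int) :
    jpChunksLoop ((b, u) :: rest) r [] =
      Jchunk (PySem.Int.floordiv r b) u ++ jpChunksLoop rest (PySem.Int.mod r b) [] := by
  simp only [jpChunksLoop, Jchunk]
  split_ifs
  · simp
  · simp
  · conv_lhs => rw [jpChunksLoop_acc]
    simp

theorem chunksA (n : Int) :
    jpChunksLoop [((10:Int) ^ 12, "チョウ"), (10 ^ 8, "オク"), (10 ^ 4, "マン"), (1, "")] n [] =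
      Jchunk (PySem.Int.floordiv n (10 ^ 12)) "チョウ" ++
      Jchunk (PySem.Int.floordiv (PySem.Int.mod n (10 ^ 12)) (10 ^ 8)) "オク" ++
      Jchunk (PySem.Int.floordiv (PySem.Int.mod (PySem.Int.mod n (10 ^ 12)) (10 ^ 8)) (10 ^ 4)) "マン" ++
      Jchunk (PySem.Int.floordiv (PySem.Int.mod (PySem.Int.mod (PySem.Int.mod n (10 ^ 12)) (10 ^ 8)) (10 ^ 4)) 1) "" := by
  rw [chunksA_step, chunksA_step, chunksA_step, chunksA_step]
  simp [jpChunksLoop]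

theorem foldl_append_init (l : List String) :
    ∀ a : String, List.foldl (fun r s => r ++ s) a l = a ++ List.foldl (fun r s => r ++ s) "" l := by
  induction l with
  | nil => intro a; simp
  | cons x xs ih => intro a; simp only [List.foldl]; rw [ih (a ++ x), ih ("" ++ x)]; simp [String.append_assoc]

theorem join_app (a b : List String) : String.join (a ++ b) = String.join a ++ String.join b := by
  induction a with
  | nil => simp [String.join]
  | cons x xs ih =>
    simp only [String.join, List.foldl, List.cons_append] at *
    rw [foldl_append_init (xs ++ b), foldl_append_init xs, ih]
    simp [String.append_assoc]

theorem join_if_singleton (P : Prop) [Decidable P] (s : String) :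
    String.join (if P then [s] else []) = if P then s else "" := by
  split_ifs <;> simp [String.join]

theorem segT_eq (t : Int) (h0 : 0 ≤ t) (h9 : t < 10) :
    (if t ≠ 0 then (if t = 1 then "セン" else if t = 3 then "サンゼン" else if t = 8 then "ハッセン"
       else PySem.List.pyGetD jpDigits t "" ++ "セン") else "") = segB 3 t := by
  interval_cases t <;> rfl

theorem segH_eq (t : Int) (h0 : 0 ≤ t) (h9 : t < 10) :
    (if t ≠ 0 then (if t = 1 then "ヒャク" else if t = 3 then "サンビャク" else if t = 6 then "ロッピャク"
       else if t = 8 then "ハッピャク" else PySem.List.pyGetD jpDigits t "" ++ "ヒャク") else "") = segB 2 t := by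
  interval_cases t <;> rfl

theorem segX_eq (t : Int) (h0 : 0 ≤ t) (h9 : t < 10) :
    (if t ≠ 0 then (if t = 1 then "ジュウ" else PySem.List.pyGetD jpDigits t "" ++ "ジュウ") else "") = segB 1 t := by
  interval_cases t <;> rfl

theorem segO_eq (t : Int) (h0 : 0 ≤ t) (h9 : t < 10) :
    (if t ≠ 0 then PySem.List.pyGetD jpDigits t "" else "") = segB 0 t := by
  interval_cases t <;> rfl

theorem under_eq (c : Int) (h0 : 0 < c) (hc : c < 10000) :
    jpUnder10000 c =
      segB 3 (c / 1000 % 10) ++ segB 2 (c / 100 % 10) ++ segB 1 (c / 10 % 10) ++ segB 0 (c % 10) := by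
  unfold jpUnder10000
  rw [if_neg (by omega)]
  simp only [PySem.Int.floordiv_eq_ediv_of_pos (show (0:Int) < 1000 by norm_num),
    PySem.Int.floordiv_eq_ediv_of_pos (show (0:Int) < 100 by norm_num),
    PySem.Int.floordiv_eq_ediv_of_pos (show (0:Int) < 10 by norm_num),
    PySem.Int.mod_eq_emod_of_pos (show (0:Int) < 10 by norm_num)]
  rw [join_app, join_app, join_app,
      join_if_singleton, join_if_singleton, join_if_singleton, join_if_singleton,
      segT_eq _ (by omega) (by omega), segH_eq _ (by omega) (by omega),
      segX_eq _ (by omega) (by omega), segO_eq _ (by omega) (by omega)]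

theorem segB_len (p d : Int) (hp0 : 0 ≤ p) (hp : p < 4) (hd1 : 1 ≤ d) (hd : d < 10) :
    0 < (segB p d).length := by
  interval_cases p <;> interval_cases d <;> decide

theorem segB_zero (p : Int) : segB p 0 = "" := rfl

theorem under_ne (c : Int) (h0 : 0 < c) (hc : c < 10000) : jpUnder10000 c ≠ "" := by
  rw [under_eq c h0 hc]
  intro hcon
  have hl := congrArg String.length hcon
  simp only [String.length_append] at hl
  have hd : ¬(c / 1000 % 10 = 0 ∧ c / 100 % 10 = 0 ∧ c / 10 % 10 = 0 ∧ c % 10 = 0) := by omega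
  have hz : ("" : String).length = 0 := rfl
  rw [hz] at hl
  by_cases h1 : c / 1000 % 10 = 0
  · by_cases h2 : c / 100 % 10 = 0
    · by_cases h3 : c / 10 % 10 = 0
      · have h4 : ¬(c % 10 = 0) := by tauto
        have := segB_len 0 (c % 10) (by omega) (by omega) (by omega) (by omega)
        omega
      · have := segB_len 1 (c / 10 % 10) (by omega) (by omega) (by omega) (by omega)
        omega
    · have := segB_len 2 (c / 100 % 10) (by omega) (by omega) (by omega) (by omega)
      omega
  · have := segB_len 3 (c / 1000 % 10) (by omega) (by omega) (by omega) (by omega)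
    omega

theorem groupJoin (c : Int) (hc0 : 0 ≤ c) (hc : c < 10000) (u : String) :
    String.join (Jchunk c u) =
      segB 3 (c / 1000 % 10) ++ segB 2 (c / 100 % 10) ++ segB 1 (c / 10 % 10) ++ segB 0 (c % 10) ++
        (if 0 < c then u else "") := by
  unfold Jchunk
  by_cases hpos : c ≤ 0
  · have hc0' : c = 0 := by omega
    subst hc0'
    norm_num [segB_zero, String.join]
  · rw [if_neg hpos, if_neg (under_ne c (by omega) hc), if_pos (by omega : 0 < c)]
    rw [under_eq c (by omega) hc]
    simp [String.join, String.append_assoc]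

theorem join_if_singleton' (P : Prop) [Decidable P] (s : String) :
    String.join (if P then [] else [s]) = if P then "" else s := by
  split_ifs <;> simp [String.join]

theorem if_segB (p d : Int) : (if d = 0 then "" else segB p d) = segB p d := by
  split_ifs with h
  · subst h
    rfl
  · rfl

theorem bEmit15 (n : Int) :
    bEmit n 15 = (if n / 1000000000000000 % 10 = 0 then [] else [segB 3 (n / 1000000000000000 % 10)]) := by
  unfold bEmit
  rw [show PySem.Int.mod (15:Int) 4 = 3 from by decide,
      show PySem.Int.floordiv (15:Int) 4 = 3 from by decide,
      show ((10:Int) ^ (15:Int).toNat) = 1000000000000000 from by decide]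
  simp only [PySem.Int.floordiv_eq_ediv_of_pos (show (0:Int) < 1000000000000000 by norm_num),
    PySem.Int.mod_eq_emod_of_pos (show (0:Int) < 10 by norm_num),
    PySem.Int.mod_eq_emod_of_pos (show (0:Int) < 10000 by norm_num)]
  norm_num

theorem bEmit14 (n : Int) :
    bEmit n 14 = (if n / 100000000000000 % 10 = 0 then [] else [segB 2 (n / 100000000000000 % 10)]) := by
  unfold bEmit
  rw [show PySem.Int.mod (14:Int) 4 = 2 from by decide,
      show PySem.Int.floordiv (14:Int) 4 = 3 from by decide,
      show ((10:Int) ^ (14:Int).toNat) = 100000000000000 from by decide]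
  simp only [PySem.Int.floordiv_eq_ediv_of_pos (show (0:Int) < 100000000000000 by norm_num),
    PySem.Int.mod_eq_emod_of_pos (show (0:Int) < 10 by norm_num),
    PySem.Int.mod_eq_emod_of_pos (show (0:Int) < 10000 by norm_num)]
  norm_num

theorem bEmit13 (n : Int) :
    bEmit n 13 = (if n / 10000000000000 % 10 = 0 then [] else [segB 1 (n / 10000000000000 % 10)]) := by
  unfold bEmit
  rw [show PySem.Int.mod (13:Int) 4 = 1 from by decide,
      show PySem.Int.floordiv (13:Int) 4 = 3 from by decide,
      show ((10:Int) ^ (13:Int).toNat) = 10000000000000 from by decide]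
  simp only [PySem.Int.floordiv_eq_ediv_of_pos (show (0:Int) < 10000000000000 by norm_num),
    PySem.Int.mod_eq_emod_of_pos (show (0:Int) < 10 by norm_num),
    PySem.Int.mod_eq_emod_of_pos (show (0:Int) < 10000 by norm_num)]
  norm_num

theorem bEmit12 (n : Int) :
    bEmit n 12 = (if n / 1000000000000 % 10 = 0 then [] else [segB 0 (n / 1000000000000 % 10)]) ++
      (if 0 < n / 1000000000000 % 10000 then ["チョウ"] else []) := by
  unfold bEmit
  rw [show PySem.Int.mod (12:Int) 4 = 0 from by decide,
      show PySem.Int.floordiv (12:Int) 4 = 3 from by decide,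
      show ((10:Int) ^ (12:Int).toNat) = 1000000000000 from by decide]
  simp only [PySem.Int.floordiv_eq_ediv_of_pos (show (0:Int) < 1000000000000 by norm_num),
    PySem.Int.mod_eq_emod_of_pos (show (0:Int) < 10 by norm_num),
    PySem.Int.mod_eq_emod_of_pos (show (0:Int) < 10000 by norm_num)]
  norm_num
  split_ifs <;> rfl

theorem bEmit11 (n : Int) :
    bEmit n 11 = (if n / 100000000000 % 10 = 0 then [] else [segB 3 (n / 100000000000 % 10)]) := by
  unfold bEmit
  rw [show PySem.Int.mod (11:Int) 4 = 3 from by decide,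
      show PySem.Int.floordiv (11:Int) 4 = 2 from by decide,
      show ((10:Int) ^ (11:Int).toNat) = 100000000000 from by decide]
  simp only [PySem.Int.floordiv_eq_ediv_of_pos (show (0:Int) < 100000000000 by norm_num),
    PySem.Int.mod_eq_emod_of_pos (show (0:Int) < 10 by norm_num),
    PySem.Int.mod_eq_emod_of_pos (show (0:Int) < 10000 by norm_num)]
  norm_num

theorem bEmit10 (n : Int) :
    bEmit n 10 = (if n / 10000000000 % 10 = 0 then [] else [segB 2 (n / 10000000000 % 10)]) := by
  unfold bEmit
  rw [show PySem.Int.mod (10:Int) 4 = 2 from by decide,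
      show PySem.Int.floordiv (10:Int) 4 = 2 from by decide,
      show ((10:Int) ^ (10:Int).toNat) = 10000000000 from by decide]
  simp only [PySem.Int.floordiv_eq_ediv_of_pos (show (0:Int) < 10000000000 by norm_num),
    PySem.Int.mod_eq_emod_of_pos (show (0:Int) < 10 by norm_num),
    PySem.Int.mod_eq_emod_of_pos (show (0:Int) < 10000 by norm_num)]
  norm_num

theorem bEmit9 (n : Int) :
    bEmit n 9 = (if n / 1000000000 % 10 = 0 then [] else [segB 1 (n / 1000000000 % 10)]) := by
  unfold bEmit
  rw [show PySem.Int.mod (9:Int) 4 = 1 from by decide,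
      show PySem.Int.floordiv (9:Int) 4 = 2 from by decide,
      show ((10:Int) ^ (9:Int).toNat) = 1000000000 from by decide]
  simp only [PySem.Int.floordiv_eq_ediv_of_pos (show (0:Int) < 1000000000 by norm_num),
    PySem.Int.mod_eq_emod_of_pos (show (0:Int) < 10 by norm_num),
    PySem.Int.mod_eq_emod_of_pos (show (0:Int) < 10000 by norm_num)]
  norm_num

theorem bEmit8 (n : Int) :
    bEmit n 8 = (if n / 100000000 % 10 = 0 then [] else [segB 0 (n / 100000000 % 10)]) ++
      (if 0 < n / 100000000 % 10000 then ["オク"] else []) := by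
  unfold bEmit
  rw [show PySem.Int.mod (8:Int) 4 = 0 from by decide,
      show PySem.Int.floordiv (8:Int) 4 = 2 from by decide,
      show ((10:Int) ^ (8:Int).toNat) = 100000000 from by decide]
  simp only [PySem.Int.floordiv_eq_ediv_of_pos (show (0:Int) < 100000000 by norm_num),
    PySem.Int.mod_eq_emod_of_pos (show (0:Int) < 10 by norm_num),
    PySem.Int.mod_eq_emod_of_pos (show (0:Int) < 10000 by norm_num)]
  norm_num
  split_ifs <;> rfl

theorem bEmit7 (n : Int) :
    bEmit n 7 = (if n / 10000000 % 10 = 0 then [] else [segB 3 (n / 10000000 % 10)]) := by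
  unfold bEmit
  rw [show PySem.Int.mod (7:Int) 4 = 3 from by decide,
      show PySem.Int.floordiv (7:Int) 4 = 1 from by decide,
      show ((10:Int) ^ (7:Int).toNat) = 10000000 from by decide]
  simp only [PySem.Int.floordiv_eq_ediv_of_pos (show (0:Int) < 10000000 by norm_num),
    PySem.Int.mod_eq_emod_of_pos (show (0:Int) < 10 by norm_num),
    PySem.Int.mod_eq_emod_of_pos (show (0:Int) < 10000 by norm_num)]
  norm_num

theorem bEmit6 (n : Int) :
    bEmit n 6 = (if n / 1000000 % 10 = 0 then [] else [segB 2 (n / 1000000 % 10)]) := by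
  unfold bEmit
  rw [show PySem.Int.mod (6:Int) 4 = 2 from by decide,
      show PySem.Int.floordiv (6:Int) 4 = 1 from by decide,
      show ((10:Int) ^ (6:Int).toNat) = 1000000 from by decide]
  simp only [PySem.Int.floordiv_eq_ediv_of_pos (show (0:Int) < 1000000 by norm_num),
    PySem.Int.mod_eq_emod_of_pos (show (0:Int) < 10 by norm_num),
    PySem.Int.mod_eq_emod_of_pos (show (0:Int) < 10000 by norm_num)]
  norm_num

theorem bEmit5 (n : Int) :
    bEmit n 5 = (if n / 100000 % 10 = 0 then [] else [segB 1 (n / 100000 % 10)]) := by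
  unfold bEmit
  rw [show PySem.Int.mod (5:Int) 4 = 1 from by decide,
      show PySem.Int.floordiv (5:Int) 4 = 1 from by decide,
      show ((10:Int) ^ (5:Int).toNat) = 100000 from by decide]
  simp only [PySem.Int.floordiv_eq_ediv_of_pos (show (0:Int) < 100000 by norm_num),
    PySem.Int.mod_eq_emod_of_pos (show (0:Int) < 10 by norm_num),
    PySem.Int.mod_eq_emod_of_pos (show (0:Int) < 10000 by norm_num)]
  norm_num

theorem bEmit4 (n : Int) :
    bEmit n 4 = (if n / 10000 % 10 = 0 then [] else [segB 0 (n / 10000 % 10)]) ++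
      (if 0 < n / 10000 % 10000 then ["マン"] else []) := by
  unfold bEmit
  rw [show PySem.Int.mod (4:Int) 4 = 0 from by decide,
      show PySem.Int.floordiv (4:Int) 4 = 1 from by decide,
      show ((10:Int) ^ (4:Int).toNat) = 10000 from by decide]
  simp only [PySem.Int.floordiv_eq_ediv_of_pos (show (0:Int) < 10000 by norm_num),
    PySem.Int.mod_eq_emod_of_pos (show (0:Int) < 10 by norm_num),
    PySem.Int.mod_eq_emod_of_pos (show (0:Int) < 10000 by norm_num)]
  norm_num
  split_ifs <;> rfl

theorem bEmit3 (n : Int) :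
    bEmit n 3 = (if n / 1000 % 10 = 0 then [] else [segB 3 (n / 1000 % 10)]) := by
  unfold bEmit
  rw [show PySem.Int.mod (3:Int) 4 = 3 from by decide,
      show PySem.Int.floordiv (3:Int) 4 = 0 from by decide,
      show ((10:Int) ^ (3:Int).toNat) = 1000 from by decide]
  simp only [PySem.Int.floordiv_eq_ediv_of_pos (show (0:Int) < 1000 by norm_num),
    PySem.Int.mod_eq_emod_of_pos (show (0:Int) < 10 by norm_num),
    PySem.Int.mod_eq_emod_of_pos (show (0:Int) < 10000 by norm_num)]
  norm_num

theorem bEmit2 (n : Int) :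
    bEmit n 2 = (if n / 100 % 10 = 0 then [] else [segB 2 (n / 100 % 10)]) := by
  unfold bEmit
  rw [show PySem.Int.mod (2:Int) 4 = 2 from by decide,
      show PySem.Int.floordiv (2:Int) 4 = 0 from by decide,
      show ((10:Int) ^ (2:Int).toNat) = 100 from by decide]
  simp only [PySem.Int.floordiv_eq_ediv_of_pos (show (0:Int) < 100 by norm_num),
    PySem.Int.mod_eq_emod_of_pos (show (0:Int) < 10 by norm_num),
    PySem.Int.mod_eq_emod_of_pos (show (0:Int) < 10000 by norm_num)]
  norm_num

theorem bEmit1 (n : Int) :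
    bEmit n 1 = (if n / 10 % 10 = 0 then [] else [segB 1 (n / 10 % 10)]) := by
  unfold bEmit
  rw [show PySem.Int.mod (1:Int) 4 = 1 from by decide,
      show PySem.Int.floordiv (1:Int) 4 = 0 from by decide,
      show ((10:Int) ^ (1:Int).toNat) = 10 from by decide]
  simp only [PySem.Int.floordiv_eq_ediv_of_pos (show (0:Int) < 10 by norm_num),
    PySem.Int.mod_eq_emod_of_pos (show (0:Int) < 10 by norm_num),
    PySem.Int.mod_eq_emod_of_pos (show (0:Int) < 10000 by norm_num)]
  norm_num

theorem bEmit0 (n : Int) :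
    bEmit n 0 = (if n % 10 = 0 then [] else [segB 0 (n % 10)]) := by
  unfold bEmit
  rw [show PySem.Int.mod (0:Int) 4 = 0 from by decide,
      show PySem.Int.floordiv (0:Int) 4 = 0 from by decide,
      show ((10:Int) ^ (0:Int).toNat) = 1 from by decide]
  simp only [PySem.Int.floordiv_eq_ediv_of_pos (show (0:Int) < 1 by norm_num),
    PySem.Int.mod_eq_emod_of_pos (show (0:Int) < 10 by norm_num),
    PySem.Int.mod_eq_emod_of_pos (show (0:Int) < 10000 by norm_num)]
  norm_num
theorem jp_pos_join_eq (n : Int) (h0 : 0 < n) (h1 : n < 10 ^ 16) :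
    String.join (jpChunksLoop [((10:Int) ^ 12, "チョウ"), (10 ^ 8, "オク"), (10 ^ 4, "マン"), (1, "")] n []) =
    String.join ((PySem.List.pyRange 15 (-1) (-1)).foldl (jpAltStep n) []) := by
  have hn0 : 0 ≤ n := le_of_lt h0
  have hn16 : n < 10000000000000000 := by norm_num at h1; omega
  rw [chunksA n, foldl_alt n]
  rw [show ((10:Int) ^ 12) = 1000000000000 from by norm_num,
      show ((10:Int) ^ 8) = 100000000 from by norm_num,
      show ((10:Int) ^ 4) = 10000 from by norm_num]
  simp only [PySem.Int.floordiv_eq_ediv_of_pos (show (0:Int) < 1000000000000 by norm_num),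
    PySem.Int.floordiv_eq_ediv_of_pos (show (0:Int) < 100000000 by norm_num),
    PySem.Int.floordiv_eq_ediv_of_pos (show (0:Int) < 10000 by norm_num),
    PySem.Int.floordiv_eq_ediv_of_pos (show (0:Int) < 1 by norm_num),
    PySem.Int.mod_eq_emod_of_pos (show (0:Int) < 1000000000000 by norm_num),
    PySem.Int.mod_eq_emod_of_pos (show (0:Int) < 100000000 by norm_num),
    PySem.Int.mod_eq_emod_of_pos (show (0:Int) < 10000 by norm_num),
    Int.ediv_one]
  rw [show n % 1000000000000 % 100000000 = n % 100000000 from by omega,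
      show n % 100000000 % 10000 = n % 10000 from by omega]
  rw [join_app, join_app, join_app]
  rw [groupJoin (n / 1000000000000) (by omega) (by omega) "チョウ",
      groupJoin (n % 1000000000000 / 100000000) (by omega) (by omega) "オク",
      groupJoin (n % 100000000 / 10000) (by omega) (by omega) "マン",
      groupJoin (n % 10000) (by omega) (by omega) ""]
  rw [bEmit15 n, bEmit14 n, bEmit13 n, bEmit12 n, bEmit11 n, bEmit10 n, bEmit9 n, bEmit8 n, bEmit7 n, bEmit6 n, bEmit5 n, bEmit4 n, bEmit3 n, bEmit2 n, bEmit1 n, bEmit0 n]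
  simp only [join_app, join_if_singleton, join_if_singleton', if_segB, ite_self]
  rw [show n / 1000000000000000 % 10 = n / 1000000000000 / 1000 % 10 from by omega,
      show n / 100000000000000 % 10 = n / 1000000000000 / 100 % 10 from by omega,
      show n / 10000000000000 % 10 = n / 1000000000000 / 10 % 10 from by omega,
      show n / 100000000000 % 10 = n % 1000000000000 / 100000000 / 1000 % 10 from by omega,
      show n / 10000000000 % 10 = n % 1000000000000 / 100000000 / 100 % 10 from by omega,
      show n / 1000000000 % 10 = n % 1000000000000 / 100000000 / 10 % 10 from by omega,
      show n / 100000000 % 10 = n % 1000000000000 / 100000000 % 10 from by omega,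
      show n / 10000000 % 10 = n % 100000000 / 10000 / 1000 % 10 from by omega,
      show n / 1000000 % 10 = n % 100000000 / 10000 / 100 % 10 from by omega,
      show n / 100000 % 10 = n % 100000000 / 10000 / 10 % 10 from by omega,
      show n / 10000 % 10 = n % 100000000 / 10000 % 10 from by omega,
      show n / 1000 % 10 = n % 10000 / 1000 % 10 from by omega,
      show n / 100 % 10 = n % 10000 / 100 % 10 from by omega,
      show n / 10 % 10 = n % 10000 / 10 % 10 from by omega,
      show n % 10 = n % 10000 % 10 from by omega,
      show n / 1000000000000 % 10000 = n / 1000000000000 from by omega,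
      show n / 100000000 % 10000 = n % 1000000000000 / 100000000 from by omega,
      show n / 10000 % 10000 = n % 100000000 / 10000 from by omega]
  simp [String.append_assoc]

theorem jp_pos_eq (n : Int) (h0 : 0 < n) (h1 : n < 10 ^ 16) :
    jp_number_kana_py n = jp_number_kana_py_alt n := by
  unfold jp_number_kana_py jp_number_kana_py_alt
  simp only [show ¬(n = 0) by omega, show ¬(n < 0) by omega, if_false]
  rw [jp_pos_join_eq n h0 h1]

-- ===== VERDICT (by name: the statement is the Claim_ definition above) =====
theorem jp_number_kana_py_spec : Claim_equal_jp_number_kana_py := by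
  intro n hDom
  unfold Spec_jp_number_kana_py
  have hb : -2147483648 ≤ n ∧ n ≤ 2147483648 := by
    simpa [Dom_jp_number_kana_py, pvDomInt] using hDom
  rcases lt_trichotomy n 0 with hlt | h0 | hgt
  · rw [jp_number_kana_py, jp_number_kana_py_alt]
    simp only [show ¬(n = 0) by omega, if_pos hlt, if_false]
    rw [jp_pos_eq (-n) (by omega) (by omega)]
  · simp [jp_number_kana_py, jp_number_kana_py_alt, h0]
  · exact jp_pos_eq n hgt (by omega)
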